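-- pv_equiv track=rewrite | github.com/CalumCumming/Python-Assignment-1 | Cumming Final Assignment Code.py | calculate_letter_score
-- ===== SOURCE A (Python) =====
-- def tokenize_name(tree): #simplifies the large tree file and breaks down each name
--     words = [word.strip("'") for word in tree.split() if word.isalpha()] #word.isalpha() ensures that hyphens and apostrophes arent added to the potential abbreviations
--     words_uppercase = [word.upper() for word in words]
--     return words_uppercase
--
-- def calculate_letter_score(letter, values_dict, tree):
--     words = tokenize_name(tree)
--
--     rarity_value = 0 #assigning the initial rarity_value
--
--     for word in words:
--         position = word.find(letter) + 1
--
--         if position == 1: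
--             rarity_value = values_dict.get(letter, 0)
--         elif position == len(word):
--             if letter == 'E': #assigning the required rules, so if the last letter of a word is E it has a value of 20
--                 rarity_value = 20
--             else: #otherwise the last letter has a value of 5
--                 rarity_value = 5
--
--         if 1 < position < len(word):
--             rarity_value = values_dict.get(letter, 0)
--
--     return rarity_value
-- ===== SOURCE B (Python) =====
-- def tokenize_name(tree):
--     words = [word.strip("'") for word in tree.split() if word.isalpha()]
--     words_uppercase = [word.upper() for word in words]
--     return words_uppercase
--
-- def calculate_letter_score(letter, values_dict, tree):
--     # only the LAST word containing `letter` determines the score: scan in reverse, return at first hit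
--     for word in reversed(tokenize_name(tree)):
--         i = word.find(letter)
--         if i != -1:
--             if i == 0 or i + 1 < len(word):
--                 return values_dict.get(letter, 0)
--             return 20 if letter == 'E' else 5
--     return 0
-- ===== Notes on version B (the rewrite author's own statement) =====
-- stated objective: simpler
-- what changed: A folds over all tokenized words keeping a rarity accumulator that only the last letter-containing word can set; B scans the words in reverse and returns the score of the first hit (the last containing word), or 0 if none contains the letter.
import Mathlib
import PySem

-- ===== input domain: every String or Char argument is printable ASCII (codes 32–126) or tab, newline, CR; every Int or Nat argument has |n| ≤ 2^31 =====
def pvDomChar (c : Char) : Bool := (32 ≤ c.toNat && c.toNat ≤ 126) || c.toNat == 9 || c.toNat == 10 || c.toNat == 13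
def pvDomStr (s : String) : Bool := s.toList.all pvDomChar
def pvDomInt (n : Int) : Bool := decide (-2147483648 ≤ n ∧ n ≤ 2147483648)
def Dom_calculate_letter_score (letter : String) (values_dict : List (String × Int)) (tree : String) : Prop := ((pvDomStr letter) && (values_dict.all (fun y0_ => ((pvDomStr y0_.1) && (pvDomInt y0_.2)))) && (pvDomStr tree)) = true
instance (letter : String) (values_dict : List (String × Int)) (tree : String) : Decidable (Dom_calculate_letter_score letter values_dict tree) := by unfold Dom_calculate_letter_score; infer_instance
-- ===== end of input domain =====

-- B replaces A's whole-list fold carrying a rarity accumulator by a reverse scan that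
-- returns at the last word containing the letter (same tokenization, same per-word rules); objective: simpler.

-- ===== PORT A =====
def tokenize_name (tree : String) : List String :=
  let words := ((PySem.Str.split₀ tree).filter (fun word => PySem.Str.strIsalpha word)).map
    (fun word => PySem.Str.stripChars word "'")
  let words_uppercase := words.map (fun word => PySem.Str.upper word)
  words_uppercase

-- the body of A's 'for word in words' loop, as a fold step over the rarity accumulator
def pvStepA (letter : String) (values_dict : List (String × Int)) (rarity_value : Int) (word : String) : Int :=
  let position := PySem.Str.find word letter + 1
  let rarity_value' :=
    if position = 1 then (PySem.Dict.mk values_dict).getD letter 0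
    else if position = PySem.Str.len word then (if letter = "E" then (20 : Int) else 5)
    else rarity_value
  if 1 < position ∧ position < PySem.Str.len word then (PySem.Dict.mk values_dict).getD letter 0
  else rarity_value'

def calculate_letter_score (letter : String) (values_dict : List (String × Int)) (tree : String) : Int :=
  let words := tokenize_name tree
  words.foldl (pvStepA letter values_dict) 0

-- ===== PORT B =====
-- Source B's 'for word in reversed(...)' loop with its early returns
def pvScanRev (letter : String) (values_dict : List (String × Int)) : List String → Int
  | [] => 0
  | word :: rest =>
    if PySem.Str.find word letter ≠ -1 then
      if PySem.Str.find word letter = 0 ∨ PySem.Str.find word letter + 1 < PySem.Str.len word then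
        (PySem.Dict.mk values_dict).getD letter 0
      else if letter = "E" then 20 else 5
    else pvScanRev letter values_dict rest

def calculate_letter_score_alt (letter : String) (values_dict : List (String × Int)) (tree : String) : Int :=
  pvScanRev letter values_dict (tokenize_name tree).reverse

-- ===== PRECONDITION & SPEC =====
def Spec_calculate_letter_score (letter : String) (values_dict : List (String × Int)) (tree : String) (out : Int) : Prop := out = calculate_letter_score_alt letter values_dict tree
instance (letter : String) (values_dict : List (String × Int)) (tree : String) (out : Int) : Decidable (Spec_calculate_letter_score letter values_dict tree out) := by unfold Spec_calculate_letter_score; infer_instance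

-- ===== CLAIM (what is proved, stated in full; the proofs are below) =====
def Claim_equal_calculate_letter_score : Prop := ∀ (letter : String) (values_dict : List (String × Int)) (tree : String), Dom_calculate_letter_score letter values_dict tree → Spec_calculate_letter_score letter values_dict tree (calculate_letter_score letter values_dict tree)

-- ===== LEMMAS AND PROOFS =====

-- every tokenized word is nonempty: isalpha filters out "" and strip/upper preserve the letters
lemma pv_dropWhile_not_contains (cs : List Char) (h : cs.all PySem.Chars.isalpha = true) :
    cs.dropWhile (fun c => (['\'']).contains c) = cs := by
  cases cs with
  | nil => rfl
  | cons c cs' =>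
    simp only [List.all_cons, Bool.and_eq_true] at h
    rw [List.dropWhile_cons_of_neg]
    have := h.1
    simp only [List.contains_eq_mem, List.mem_singleton, decide_eq_true_eq]
    intro hc; subst hc; exact absurd this (by decide)

lemma pv_stripChars_alpha (cs : List Char) (h : cs.all PySem.Chars.isalpha = true) :
    PySem.Chars.stripChars cs ['\''] = cs := by
  show (List.dropWhile (fun c => (['\'']).contains c)
      (List.dropWhile (fun c => (['\'']).contains c) cs).reverse).reverse = cs
  rw [pv_dropWhile_not_contains cs h, pv_dropWhile_not_contains _ (by simpa using h),
    List.reverse_reverse]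

lemma pv_tokenize_nonempty (tree : String) :
    ∀ w ∈ tokenize_name tree, w.toList ≠ [] := by
  intro w hw
  unfold tokenize_name at hw
  simp only [List.mem_map, List.mem_filter] at hw
  obtain ⟨v, ⟨x, ⟨hx, ha⟩, hv⟩, hw⟩ := hw
  rw [PySem.Str.strIsalpha_eq, PySem.Chars.strIsalpha, Bool.and_eq_true] at ha
  subst hv hw
  rw [PySem.Str.toList_upper, PySem.Str.toList_stripChars]
  have hstr : ("'" : String).toList = ['\''] := rfl
  rw [hstr, pv_stripChars_alpha _ ha.2]
  unfold PySem.Chars.upper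
  intro hnil
  rw [List.map_eq_nil_iff] at hnil
  rw [hnil] at ha
  simp at ha

-- if the word contains the letter the match starts strictly before the end
lemma pv_find_lt_len (w letter : String) (hw : w.toList ≠ [])
 :
    PySem.Str.find w letter < (w.toList.length : Int) := by
  rw [PySem.Str.find_eq]
  have h2 := PySem.Chars.find_le_length w.toList letter.toList
  rcases lt_or_eq_of_le h2 with h | h
  · exact h
  · exfalso
    have hpos : 0 ≤ PySem.Chars.find w.toList letter.toList := by
      rw [h]; exact Int.natCast_nonneg _
    have hsp := (PySem.Chars.find_spec hpos).1
    rw [h] at hsp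
    simp only [Int.toNat_natCast, List.drop_length] at hsp
    have : letter.toList = [] := List.prefix_nil.mp hsp
    rw [this, PySem.Chars.find_nil] at h
    exact hw (List.eq_nil_of_length_eq_zero (by omega))

-- A's loop body equals "skip, or B's per-word score"
lemma pv_step_eq (letter : String) (values_dict : List (String × Int)) (a : Int) (w : String)
    (hw : w.toList ≠ []) :
    pvStepA letter values_dict a w =
      if PySem.Str.find w letter ≠ -1 then
        (if PySem.Str.find w letter = 0 ∨ PySem.Str.find w letter + 1 < PySem.Str.len w then
          (PySem.Dict.mk values_dict).getD letter 0
        else if letter = "E" then 20 else 5)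
      else a := by
  have hlen : PySem.Str.len w = (w.toList.length : Int) := by
    simp [PySem.Str.len_eq]
  have hlen0 : 0 < w.toList.length := List.length_pos_iff.mpr hw
  have h1 : -1 ≤ PySem.Str.find w letter := by
    rw [PySem.Str.find_eq]; exact PySem.Chars.neg_one_le_find _ _
  unfold pvStepA
  by_cases hf : PySem.Str.find w letter ≠ -1
  · have h2 := pv_find_lt_len w letter hw
    simp only [hlen]
    split_ifs <;> omega
  · simp only [hf, if_false, hlen]
    have hf' : PySem.Str.find w letter = -1 := by omega
    split_ifs <;> omega

-- reverse scan: stops inside m when m has a hit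
lemma pv_scan_stop (letter : String) (values_dict : List (String × Int)) (m t : List String)
    (h : ∃ w ∈ m, PySem.Str.find w letter ≠ -1) :
    pvScanRev letter values_dict (m ++ t) = pvScanRev letter values_dict m := by
  induction m with
  | nil => simp at h
  | cons w ws ih =>
    simp only [List.cons_append, pvScanRev]
    by_cases hw : PySem.Str.find w letter ≠ -1
    · rw [if_pos hw, if_pos hw]
    · rw [if_neg hw, if_neg hw]
      apply ih
      rcases h with ⟨v, hv, hv2⟩
      rcases List.mem_cons.mp hv with rfl | hv'
      · exact absurd hv2 hw
      · exact ⟨v, hv', hv2⟩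

-- reverse scan: passes over m when m has no hit
lemma pv_scan_skip (letter : String) (values_dict : List (String × Int)) (m t : List String)
    (h : ∀ w ∈ m, PySem.Str.find w letter = -1) :
    pvScanRev letter values_dict (m ++ t) = pvScanRev letter values_dict t := by
  induction m with
  | nil => simp
  | cons w ws ih =>
    simp only [List.cons_append, pvScanRev]
    have hw : PySem.Str.find w letter = -1 := h w (List.mem_cons_self)
    simp only [hw]
    simp only [ne_eq, not_true_eq_false, if_false]
    exact ih (fun v hv => h v (List.mem_cons_of_mem _ hv))

-- the fold over the words equals the reverse scan (or the start value if no word matches)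
lemma pv_fold_eq (letter : String) (values_dict : List (String × Int)) :
    ∀ (l : List String) (a : Int), (∀ w ∈ l, w.toList ≠ []) →
      l.foldl (pvStepA letter values_dict) a =
        if ∃ w ∈ l, PySem.Str.find w letter ≠ -1 then
          pvScanRev letter values_dict l.reverse
        else a := by
  intro l
  induction l with
  | nil => intro a _; simp
  | cons w ws ih =>
    intro a hne
    simp only [List.foldl_cons, List.reverse_cons]
    rw [ih _ (fun v hv => hne v (List.mem_cons_of_mem _ hv))]
    by_cases h1 : ∃ v ∈ ws, PySem.Str.find v letter ≠ -1
    · have h2 : ∃ v ∈ w :: ws, PySem.Str.find v letter ≠ -1 := by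
        rcases h1 with ⟨v, hv, h⟩; exact ⟨v, List.mem_cons_of_mem _ hv, h⟩
      simp only [h1, h2, if_true]
      rw [pv_scan_stop]
      rcases h1 with ⟨v, hv, h⟩
      exact ⟨v, List.mem_reverse.mpr hv, h⟩
    · simp only [h1, if_false]
      rw [pv_step_eq letter values_dict a w (hne w List.mem_cons_self)]
      have hall : ∀ v ∈ ws.reverse, PySem.Str.find v letter = -1 := by
        intro v hv
        by_contra hc
        exact h1 ⟨v, List.mem_reverse.mp hv, hc⟩
      rw [pv_scan_skip letter values_dict ws.reverse [w] hall]
      by_cases hw : PySem.Str.find w letter ≠ -1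
      · have h2 : ∃ v ∈ w :: ws, PySem.Str.find v letter ≠ -1 :=
          ⟨w, List.mem_cons_self, hw⟩
        rw [if_pos hw, if_pos h2]
        simp only [pvScanRev]
        rw [if_pos hw]
      · have h2 : ¬ ∃ v ∈ w :: ws, PySem.Str.find v letter ≠ -1 := by
          rintro ⟨v, hv, h⟩
          rcases List.mem_cons.mp hv with rfl | hv'
          · exact hw h
          · exact h1 ⟨v, hv', h⟩
        rw [if_neg hw, if_neg h2]

-- ===== VERDICT (by name: the statement is the Claim_ definition above) =====
theorem calculate_letter_score_spec : Claim_equal_calculate_letter_score := by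
  intro letter values_dict tree _
  unfold Spec_calculate_letter_score calculate_letter_score calculate_letter_score_alt
  rw [pv_fold_eq letter values_dict (tokenize_name tree) 0 (pv_tokenize_nonempty tree)]
  by_cases h : ∃ w ∈ tokenize_name tree, PySem.Str.find w letter ≠ -1
  · simp only [h, if_true]
  · simp only [h, if_false]
    rw [show (tokenize_name tree).reverse = (tokenize_name tree).reverse ++ [] by simp]
    rw [pv_scan_skip letter values_dict _ []
      (fun v hv => by
        by_contra hc
        exact h ⟨v, List.mem_reverse.mp hv, hc⟩)]
    rfl
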